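-- pv_equiv track=rewrite | github.com/vitalab/neuralteleportation | neuralteleportation/network_graph.py | correct_indexes
-- ===== SOURCE A (Python) =====
-- from typing import Dict
--
-- def correct_indexes(layers: Dict) -> Dict:
--     """
--         Correct the layer indexes to start at zero.
--     """
--     counter = 0
--     correction_dict = {}
--     for k in layers.keys():
--         l_in = layers[k]['in']
--         for i in range(len(l_in)):
--             if l_in[i] in correction_dict.keys():
--                 l_in[i] = correction_dict[l_in[i]]
--             else:
--                 correction_dict[l_in[i]] = counter
--                 l_in[i] = counter
--                 counter += 1
--         l_out = layers[k]['out']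
--         for i in range(len(l_out)):
--             if l_out[i] in correction_dict.keys():
--                 l_out[i] = correction_dict[l_out[i]]
--             else:
--                 correction_dict[l_out[i]] = counter
--                 l_out[i] = counter
--                 counter += 1
--
--     return layers
-- ===== SOURCE B (Python) =====
-- def correct_indexes(layers):
--     """
--         Correct the layer indexes to start at zero.
--     """
--     # Pass 1: build the renumbering table without mutating anything.
--     correction_dict = {}
--     counter = 0
--     for k in layers:
--         d = layers[k]
--         for v in d['in']:
--             if v not in correction_dict:
--                 correction_dict[v] = counter
--                 counter += 1
--         for v in d['out']:
--             if v not in correction_dict: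
--                 correction_dict[v] = counter
--                 counter += 1
--     # Pass 2: apply the table in place.
--     for k in layers:
--         d = layers[k]
--         d['in'][:] = [correction_dict[v] for v in d['in']]
--         d['out'][:] = [correction_dict[v] for v in d['out']]
--     return layers
-- ===== Notes on version B (the rewrite author's own statement) =====
-- stated objective: alternative
-- what changed: A renumbers and mutates in a single threaded pass; B first builds the full correction table over all layers without mutating, then a second pass rewrites every 'in'/'out' list by pure table lookup. Pre_ excludes inner dicts missing an 'in' or 'out' key (KeyError in A) and duplicate keys in the outer or an inner association list, which do not represent a Python dict state faithfully.
import Mathlib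
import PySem

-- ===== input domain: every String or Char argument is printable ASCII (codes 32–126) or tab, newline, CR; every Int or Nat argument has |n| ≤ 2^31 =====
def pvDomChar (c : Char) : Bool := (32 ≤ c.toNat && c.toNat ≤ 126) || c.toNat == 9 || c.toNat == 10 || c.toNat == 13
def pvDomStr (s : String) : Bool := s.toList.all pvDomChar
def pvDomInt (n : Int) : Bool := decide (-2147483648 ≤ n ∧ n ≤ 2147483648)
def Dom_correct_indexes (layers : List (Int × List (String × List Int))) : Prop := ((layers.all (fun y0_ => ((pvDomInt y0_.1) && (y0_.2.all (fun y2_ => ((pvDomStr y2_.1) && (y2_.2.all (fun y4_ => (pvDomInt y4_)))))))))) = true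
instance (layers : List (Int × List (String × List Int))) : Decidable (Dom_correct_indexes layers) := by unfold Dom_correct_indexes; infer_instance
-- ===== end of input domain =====

-- B splits A's single mutate-as-you-go pass into two passes (build the renumbering table, then apply it); same cost, different decomposition. Return-value equivalence: A mutates the inner lists in place (B mutates the same way in Python).


-- shared dict-as-assoc-list helpers: d[k] (default only reached outside Pre_) and in-place value replacement
def pvGetVal (d : List (String × List Int)) (k : String) : List Int :=
  (PySem.Dict.mk d).getD k []
def pvSetVal (d : List (String × List Int)) (k : String) (v : List Int) : List (String × List Int) :=
  ((PySem.Dict.mk d).insert k v).items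

-- ===== PORT A =====
-- the inner index loop of A: renumber one list while threading (correction_dict, counter)
def fixList : List Int → PySem.Dict Int Int → Int → List Int × PySem.Dict Int Int × Int
  | [], cd, c => ([], cd, c)
  | v :: vs, cd, c =>
    match cd.get? v with
    | some n => let r := fixList vs cd c; (n :: r.1, r.2)
    | none => let r := fixList vs (cd.insert v c) (c + 1); (c :: r.1, r.2)

def goA : List (Int × List (String × List Int)) → PySem.Dict Int Int → Int → List (Int × List (String × List Int))
  | [], _, _ => []
  | (k, d) :: rest, cd, c =>
    let rin := fixList (pvGetVal d "in") cd c
    let rout := fixList (pvGetVal d "out") rin.2.1 rin.2.2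
    (k, pvSetVal (pvSetVal d "in" rin.1) "out" rout.1) :: goA rest rout.2.1 rout.2.2

def correct_indexes (layers : List (Int × List (String × List Int))) : List (Int × List (String × List Int)) :=
  goA layers PySem.Dict.empty 0

-- ===== PORT B =====
-- pass 1: extend (correction_dict, counter) with the unseen values of one list
def buildList (st : PySem.Dict Int Int × Int) (vs : List Int) : PySem.Dict Int Int × Int :=
  vs.foldl (fun st v => if st.1.contains v then st else (st.1.insert v st.2, st.2 + 1)) st

def buildStep (st : PySem.Dict Int Int × Int) (kd : Int × List (String × List Int)) : PySem.Dict Int Int × Int :=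
  buildList (buildList st (pvGetVal kd.2 "in")) (pvGetVal kd.2 "out")

def correct_indexes_alt (layers : List (Int × List (String × List Int))) : List (Int × List (String × List Int)) :=
  let cd := (layers.foldl buildStep (PySem.Dict.empty, 0)).1
  layers.map (fun kd =>
    (kd.1, pvSetVal (pvSetVal kd.2 "in" ((pvGetVal kd.2 "in").map (fun v => cd.getD v 0)))
                    "out" ((pvGetVal kd.2 "out").map (fun v => cd.getD v 0))))

-- ===== PRECONDITION & SPEC =====
-- Pre_ excludes inner dicts missing an 'in' or 'out' key (A raises KeyError there) and duplicate keys
-- in the outer or an inner association list, which do not represent a Python dict state faithfully.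
def Pre_correct_indexes (layers : List (Int × List (String × List Int))) : Prop :=
  (layers.map (·.1)).Nodup ∧
  ∀ kd ∈ layers, (kd.2.map (·.1)).Nodup ∧ "in" ∈ kd.2.map (·.1) ∧ "out" ∈ kd.2.map (·.1)
instance (layers : List (Int × List (String × List Int))) : Decidable (Pre_correct_indexes layers) := by
  unfold Pre_correct_indexes; infer_instance

def pvWitness_correct_indexes : (List (Int × List (String × List Int))) :=
  [(1, [("in", [3]), ("out", [3, 7])]), (2, [("in", [7]), ("out", [9])])]

def Spec_correct_indexes (layers : List (Int × List (String × List Int))) (out : List (Int × List (String × List Int))) : Prop := out = correct_indexes_alt layers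
instance (layers : List (Int × List (String × List Int))) (out : List (Int × List (String × List Int))) : Decidable (Spec_correct_indexes layers out) := by unfold Spec_correct_indexes; infer_instance

-- ===== CLAIM (what is proved, stated in full; the proofs are below) =====
def Claim_equal_correct_indexes : Prop := ∀ (layers : List (Int × List (String × List Int))), Dom_correct_indexes layers → Pre_correct_indexes layers → Spec_correct_indexes layers (correct_indexes layers)

-- ===== LEMMAS AND PROOFS =====

-- entries of the correction dict never change once inserted: d' "extends" d
def DExt (d d' : PySem.Dict Int Int) : Prop := ∀ v n, d.get? v = some n → d'.get? v = some n

theorem dext_refl (d : PySem.Dict Int Int) : DExt d d := fun _ _ h => h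

theorem dext_trans {a b c : PySem.Dict Int Int} (h1 : DExt a b) (h2 : DExt b c) : DExt a c :=
  fun v n h => h2 v n (h1 v n h)

theorem dext_buildList (vs : List Int) (st : PySem.Dict Int Int × Int) :
    DExt st.1 (buildList st vs).1 := by
  induction vs generalizing st with
  | nil => exact dext_refl _
  | cons v vs ih =>
    simp only [buildList, List.foldl_cons] at *
    refine dext_trans ?_ (ih _)
    by_cases hc : st.1.contains v = true
    · simp [hc]; exact dext_refl _
    · simp [hc]
      intro w n h
      have hwv : w ≠ v := by
        intro he; subst he
        rw [PySem.Dict.contains_eq_isSome_get?, h] at hc; simp at hc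
      rw [PySem.Dict.get?_insert_of_ne _ _ hwv]
      exact h

theorem dext_foldl (layers : List (Int × List (String × List Int))) (st : PySem.Dict Int Int × Int) :
    DExt st.1 (layers.foldl buildStep st).1 := by
  induction layers generalizing st with
  | nil => exact dext_refl _
  | cons kd rest ih =>
    simp only [List.foldl_cons]
    exact dext_trans (dext_trans (dext_buildList _ _) (dext_buildList _ _)) (ih _)

-- A's threaded renumbering of one list = build pass on that list + lookup in any extension of its table
theorem fix_spec (vs : List Int) (cd : PySem.Dict Int Int) (c : Int) (cd' : PySem.Dict Int Int)
    (hext : DExt (buildList (cd, c) vs).1 cd') :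
    fixList vs cd c = ((vs.map fun v => cd'.getD v 0), buildList (cd, c) vs) := by
  induction vs generalizing cd c with
  | nil => simp [fixList, buildList]
  | cons v vs ih =>
    simp only [buildList, List.foldl_cons] at hext ⊢
    cases h : cd.get? v with
    | some n =>
      have hc : cd.contains v = true := by
        rw [PySem.Dict.contains_eq_isSome_get?, h]; rfl
      simp only [hc, if_true] at hext ⊢
      have hval : cd'.getD v 0 = n := by
        have := hext v n (dext_buildList vs (cd, c) v n h)
        exact PySem.Dict.getD_of_get?_eq_some _ _ this
      simp only [fixList, h, List.map_cons, hval]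
      rw [ih cd c hext]
      simp [buildList]
    | none =>
      have hc : cd.contains v = false := by
        rw [PySem.Dict.contains_eq_isSome_get?, h]; rfl
      simp only [hc, if_false, Bool.false_eq_true] at hext ⊢
      have hval : cd'.getD v 0 = c := by
        have h1 : (cd.insert v c).get? v = some c := PySem.Dict.get?_insert_self _ _ _
        have := hext v c (dext_buildList vs (cd.insert v c, c + 1) v c h1)
        exact PySem.Dict.getD_of_get?_eq_some _ _ this
      simp only [fixList, h, List.map_cons, hval]
      rw [ih (cd.insert v c) (c + 1) hext]
      simp [buildList]

theorem go_spec (layers : List (Int × List (String × List Int))) (cd : PySem.Dict Int Int) (c : Int)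
    (cd' : PySem.Dict Int Int) (hext : DExt (layers.foldl buildStep (cd, c)).1 cd') :
    goA layers cd c = layers.map (fun kd =>
      (kd.1, pvSetVal (pvSetVal kd.2 "in" ((pvGetVal kd.2 "in").map (fun v => cd'.getD v 0)))
                      "out" ((pvGetVal kd.2 "out").map (fun v => cd'.getD v 0)))) := by
  induction layers generalizing cd c with
  | nil => simp [goA]
  | cons kd rest ih =>
    obtain ⟨k, d⟩ := kd
    simp only [List.foldl_cons] at hext
    have hext2 : DExt (buildList (buildList (cd, c) (pvGetVal d "in")) (pvGetVal d "out")).1 cd' :=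
      dext_trans (dext_foldl rest _) hext
    have hext1 : DExt (buildList (cd, c) (pvGetVal d "in")).1 cd' :=
      dext_trans (dext_buildList _ _) hext2
    have h1 := fix_spec (pvGetVal d "in") cd c cd' hext1
    have h2 := fix_spec (pvGetVal d "out") (buildList (cd, c) (pvGetVal d "in")).1
      (buildList (cd, c) (pvGetVal d "in")).2 cd' (by rw [Prod.mk.eta]; exact hext2)
    simp only [goA, List.map_cons, h1]
    rw [Prod.mk.eta] at h2
    simp only [h2]
    refine congrArg₂ _ rfl ?_
    exact ih _ _ (by rw [Prod.mk.eta]; exact hext)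

-- ===== VERDICT (by name: the statement is the Claim_ definition above) =====
theorem correct_indexes_spec : Claim_equal_correct_indexes := by
  intro layers _ _
  unfold Spec_correct_indexes correct_indexes correct_indexes_alt
  exact go_spec layers PySem.Dict.empty 0 _ (dext_refl _)
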